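-- pv_equiv track=rewrite | github.com/lsantos7654/context_server | context_server/core/query_analysis.py | _is_question
-- ===== SOURCE A (Python) =====
-- def _is_question(query: str) -> bool:
--     """Determine if the query is phrased as a question."""
--     # Explicit question mark
--     if "?" in query:
--         return True
--
--     # Question words at the beginning of query
--     question_words = ["how", "what", "where", "when", "why", "which", "who"]
--     query_lower = query.lower().strip()
--
--     # Check if query starts with question words
--     for word in question_words:
--         if query_lower.startswith(word + " "):
--             return True
--
--     return False
-- ===== SOURCE B (Python) =====
-- # A tiny DFA (flat transition table) that scans the lowered/stripped query once,
-- # accepting exactly when it consumes one of the seven question words followed by a space.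
-- _START = 0
-- _ACCEPT = -1
-- _DFA = {
--     (0, "h"): 1, (1, "o"): 2, (2, "w"): 3, (3, " "): -1,
--     (0, "w"): 4, (4, "h"): 5,
--     (5, "a"): 6, (6, "t"): 7, (7, " "): -1,
--     (5, "e"): 8, (8, "r"): 9, (9, "e"): 10, (10, " "): -1,
--     (8, "n"): 11, (11, " "): -1,
--     (5, "y"): 12, (12, " "): -1,
--     (5, "i"): 13, (13, "c"): 14, (14, "h"): 15, (15, " "): -1,
--     (5, "o"): 16, (16, " "): -1,
-- }
--
--
-- def _is_question(query: str) -> bool: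
--     if "?" in query:
--         return True
--     state = _START
--     for ch in query.lower().strip():
--         state = _DFA.get((state, ch))
--         if state == _ACCEPT:
--             return True
--         if state is None:
--             return False
--     return False
-- ===== Notes on version B (the rewrite author's own statement) =====
-- stated objective: alternative
-- what changed: Replaces the loop of seven startswith(word + ' ') prefix tests by a hand-built deterministic finite automaton (a flat transition table) that scans the lowered/stripped query once, character by character, accepting exactly on a question word followed by a space.
import Mathlib
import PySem

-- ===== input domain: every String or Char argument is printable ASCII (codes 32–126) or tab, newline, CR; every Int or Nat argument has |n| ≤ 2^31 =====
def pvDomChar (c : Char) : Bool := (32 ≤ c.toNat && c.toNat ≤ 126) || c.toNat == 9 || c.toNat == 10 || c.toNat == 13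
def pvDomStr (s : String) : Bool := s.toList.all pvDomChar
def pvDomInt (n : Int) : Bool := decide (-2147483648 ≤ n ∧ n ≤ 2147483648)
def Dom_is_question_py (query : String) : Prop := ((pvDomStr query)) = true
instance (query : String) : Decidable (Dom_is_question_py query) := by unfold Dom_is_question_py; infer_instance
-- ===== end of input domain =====

-- B replaces A's loop of seven startswith(word + " ") prefix tests by a small DFA (flat transition
-- table) scanned once over the lowered/stripped query (alternative algorithm; same behaviour).

-- ===== PORT A =====
def is_question_py (query : String) : Bool :=
  if PySem.Str.isIn "?" query then true
  else
    let question_words : List String := ["how", "what", "where", "when", "why", "which", "who"]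
    let query_lower := PySem.Str.strip (PySem.Str.lower query)
    question_words.any (fun word => PySem.Str.startswith query_lower (word ++ " "))

-- ===== PORT B =====
-- Python dict literal with pairwise-distinct literal keys: ported as Dict.mk of the same pairs (exact).
def pvDfa : PySem.Dict (Int × Char) Int := PySem.Dict.mk
  [((0,'h'),1), ((1,'o'),2), ((2,'w'),3), ((3,' '),-1),
   ((0,'w'),4), ((4,'h'),5),
   ((5,'a'),6), ((6,'t'),7), ((7,' '),-1),
   ((5,'e'),8), ((8,'r'),9), ((9,'e'),10), ((10,' '),-1),
   ((8,'n'),11), ((11,' '),-1),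
   ((5,'y'),12), ((12,' '),-1),
   ((5,'i'),13), ((13,'c'),14), ((14,'h'),15), ((15,' '),-1),
   ((5,'o'),16), ((16,' '),-1)]

-- the for-loop over the characters, with its two early returns
def pvRun : Int → List Char → Bool
  | _, [] => false
  | s, c :: rest =>
    match pvDfa.get? (s, c) with
    | none => false
    | some s' => if s' == -1 then true else pvRun s' rest

def is_question_py_alt (query : String) : Bool :=
  if PySem.Str.isIn "?" query then true
  else pvRun 0 (PySem.Str.strip (PySem.Str.lower query)).toList

-- ===== PRECONDITION & SPEC =====
def Spec_is_question_py (query : String) (out : Bool) : Prop := out = is_question_py_alt query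
instance (query : String) (out : Bool) : Decidable (Spec_is_question_py query out) := by unfold Spec_is_question_py; infer_instance

-- ===== CLAIM (what is proved, stated in full; the proofs are below) =====
def Claim_equal_is_question_py : Prop := ∀ (query : String), Dom_is_question_py query → Spec_is_question_py query (is_question_py query)

-- ===== LEMMAS AND PROOFS =====

-- per-state characterisations of the DFA run: pvRun s t tests the remaining suffix(es)
theorem pv_run3 (t : List Char) : pvRun 3 t = ([' '] : List Char).isPrefixOf t := by
  cases t with
  | nil => rfl
  | cons c r =>
    by_cases h : ' ' = c
    · subst h; simp [pvRun, pvDfa, PySem.Dict.get?_mk_cons]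
    · simp [pvRun, pvDfa, PySem.Dict.get?, beq_iff_eq, h, List.isPrefixOf]

theorem pv_run2 (t : List Char) : pvRun 2 t = (['w',' '] : List Char).isPrefixOf t := by
  cases t with
  | nil => rfl
  | cons c r =>
    by_cases h : 'w' = c
    · subst h; simp [pvRun, pvDfa, PySem.Dict.get?_mk_cons, pv_run3, List.isPrefixOf]
    · simp [pvRun, pvDfa, PySem.Dict.get?, beq_iff_eq, h, List.isPrefixOf]

theorem pv_run1 (t : List Char) : pvRun 1 t = (['o','w',' '] : List Char).isPrefixOf t := by
  cases t with
  | nil => rfl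
  | cons c r =>
    by_cases h : 'o' = c
    · subst h; simp [pvRun, pvDfa, PySem.Dict.get?_mk_cons, pv_run2, List.isPrefixOf]
    · simp [pvRun, pvDfa, PySem.Dict.get?, beq_iff_eq, h, List.isPrefixOf]

theorem pv_run7 (t : List Char) : pvRun 7 t = ([' '] : List Char).isPrefixOf t := by
  cases t with
  | nil => rfl
  | cons c r =>
    by_cases h : ' ' = c
    · subst h; simp [pvRun, pvDfa, PySem.Dict.get?_mk_cons]
    · simp [pvRun, pvDfa, PySem.Dict.get?, beq_iff_eq, h, List.isPrefixOf]

theorem pv_run6 (t : List Char) : pvRun 6 t = (['t',' '] : List Char).isPrefixOf t := by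
  cases t with
  | nil => rfl
  | cons c r =>
    by_cases h : 't' = c
    · subst h; simp [pvRun, pvDfa, PySem.Dict.get?_mk_cons, pv_run7, List.isPrefixOf]
    · simp [pvRun, pvDfa, PySem.Dict.get?, beq_iff_eq, h, List.isPrefixOf]

theorem pv_run10 (t : List Char) : pvRun 10 t = ([' '] : List Char).isPrefixOf t := by
  cases t with
  | nil => rfl
  | cons c r =>
    by_cases h : ' ' = c
    · subst h; simp [pvRun, pvDfa, PySem.Dict.get?_mk_cons]
    · simp [pvRun, pvDfa, PySem.Dict.get?, beq_iff_eq, h, List.isPrefixOf]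

theorem pv_run9 (t : List Char) : pvRun 9 t = (['e',' '] : List Char).isPrefixOf t := by
  cases t with
  | nil => rfl
  | cons c r =>
    by_cases h : 'e' = c
    · subst h; simp [pvRun, pvDfa, PySem.Dict.get?_mk_cons, pv_run10, List.isPrefixOf]
    · simp [pvRun, pvDfa, PySem.Dict.get?, beq_iff_eq, h, List.isPrefixOf]

theorem pv_run11 (t : List Char) : pvRun 11 t = ([' '] : List Char).isPrefixOf t := by
  cases t with
  | nil => rfl
  | cons c r =>
    by_cases h : ' ' = c
    · subst h; simp [pvRun, pvDfa, PySem.Dict.get?_mk_cons]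
    · simp [pvRun, pvDfa, PySem.Dict.get?, beq_iff_eq, h, List.isPrefixOf]

theorem pv_run8 (t : List Char) :
    pvRun 8 t = ((['r','e',' '] : List Char).isPrefixOf t || (['n',' '] : List Char).isPrefixOf t) := by
  cases t with
  | nil => rfl
  | cons c r =>
    by_cases hr : 'r' = c
    · subst hr; simp [pvRun, pvDfa, PySem.Dict.get?_mk_cons, pv_run9, List.isPrefixOf]
    · by_cases hn : 'n' = c
      · subst hn; simp [pvRun, pvDfa, PySem.Dict.get?_mk_cons, pv_run11, List.isPrefixOf]
      · simp [pvRun, pvDfa, PySem.Dict.get?, beq_iff_eq, hr, hn, List.isPrefixOf]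

theorem pv_run12 (t : List Char) : pvRun 12 t = ([' '] : List Char).isPrefixOf t := by
  cases t with
  | nil => rfl
  | cons c r =>
    by_cases h : ' ' = c
    · subst h; simp [pvRun, pvDfa, PySem.Dict.get?_mk_cons]
    · simp [pvRun, pvDfa, PySem.Dict.get?, beq_iff_eq, h, List.isPrefixOf]

theorem pv_run15 (t : List Char) : pvRun 15 t = ([' '] : List Char).isPrefixOf t := by
  cases t with
  | nil => rfl
  | cons c r =>
    by_cases h : ' ' = c
    · subst h; simp [pvRun, pvDfa, PySem.Dict.get?_mk_cons]
    · simp [pvRun, pvDfa, PySem.Dict.get?, beq_iff_eq, h, List.isPrefixOf]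

theorem pv_run14 (t : List Char) : pvRun 14 t = (['h',' '] : List Char).isPrefixOf t := by
  cases t with
  | nil => rfl
  | cons c r =>
    by_cases h : 'h' = c
    · subst h; simp [pvRun, pvDfa, PySem.Dict.get?_mk_cons, pv_run15, List.isPrefixOf]
    · simp [pvRun, pvDfa, PySem.Dict.get?, beq_iff_eq, h, List.isPrefixOf]

theorem pv_run13 (t : List Char) : pvRun 13 t = (['c','h',' '] : List Char).isPrefixOf t := by
  cases t with
  | nil => rfl
  | cons c r =>
    by_cases h : 'c' = c
    · subst h; simp [pvRun, pvDfa, PySem.Dict.get?_mk_cons, pv_run14, List.isPrefixOf]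
    · simp [pvRun, pvDfa, PySem.Dict.get?, beq_iff_eq, h, List.isPrefixOf]

theorem pv_run16 (t : List Char) : pvRun 16 t = ([' '] : List Char).isPrefixOf t := by
  cases t with
  | nil => rfl
  | cons c r =>
    by_cases h : ' ' = c
    · subst h; simp [pvRun, pvDfa, PySem.Dict.get?_mk_cons]
    · simp [pvRun, pvDfa, PySem.Dict.get?, beq_iff_eq, h, List.isPrefixOf]

theorem pv_run5 (t : List Char) :
    pvRun 5 t = ((['a','t',' '] : List Char).isPrefixOf t ||
                 (['e','r','e',' '] : List Char).isPrefixOf t ||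
                 (['e','n',' '] : List Char).isPrefixOf t ||
                 (['y',' '] : List Char).isPrefixOf t ||
                 (['i','c','h',' '] : List Char).isPrefixOf t ||
                 (['o',' '] : List Char).isPrefixOf t) := by
  cases t with
  | nil => rfl
  | cons c r =>
    by_cases ha : 'a' = c
    · subst ha; simp [pvRun, pvDfa, PySem.Dict.get?_mk_cons, pv_run6, List.isPrefixOf]
    · by_cases he : 'e' = c
      · subst he; simp [pvRun, pvDfa, PySem.Dict.get?_mk_cons, pv_run8, List.isPrefixOf]
      · by_cases hy : 'y' = c
        · subst hy; simp [pvRun, pvDfa, PySem.Dict.get?_mk_cons, pv_run12, List.isPrefixOf]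
        · by_cases hi : 'i' = c
          · subst hi; simp [pvRun, pvDfa, PySem.Dict.get?_mk_cons, pv_run13, List.isPrefixOf]
          · by_cases ho : 'o' = c
            · subst ho; simp [pvRun, pvDfa, PySem.Dict.get?_mk_cons, pv_run16, List.isPrefixOf]
            · simp [pvRun, pvDfa, PySem.Dict.get?, beq_iff_eq, ha, he, hy, hi, ho, List.isPrefixOf]

theorem pv_run4 (t : List Char) :
    pvRun 4 t = ((['h','a','t',' '] : List Char).isPrefixOf t ||
                 (['h','e','r','e',' '] : List Char).isPrefixOf t ||
                 (['h','e','n',' '] : List Char).isPrefixOf t ||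
                 (['h','y',' '] : List Char).isPrefixOf t ||
                 (['h','i','c','h',' '] : List Char).isPrefixOf t ||
                 (['h','o',' '] : List Char).isPrefixOf t) := by
  cases t with
  | nil => rfl
  | cons c r =>
    by_cases h : 'h' = c
    · subst h; simp [pvRun, pvDfa, PySem.Dict.get?_mk_cons, pv_run5, List.isPrefixOf]
    · simp [pvRun, pvDfa, PySem.Dict.get?, beq_iff_eq, h, List.isPrefixOf]

theorem pv_run0 (t : List Char) :
    pvRun 0 t = ((['h','o','w',' '] : List Char).isPrefixOf t ||
                 (['w','h','a','t',' '] : List Char).isPrefixOf t ||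
                 (['w','h','e','r','e',' '] : List Char).isPrefixOf t ||
                 (['w','h','e','n',' '] : List Char).isPrefixOf t ||
                 (['w','h','y',' '] : List Char).isPrefixOf t ||
                 (['w','h','i','c','h',' '] : List Char).isPrefixOf t ||
                 (['w','h','o',' '] : List Char).isPrefixOf t) := by
  cases t with
  | nil => rfl
  | cons c r =>
    by_cases hh : 'h' = c
    · subst hh; simp [pvRun, pvDfa, PySem.Dict.get?_mk_cons, pv_run1, List.isPrefixOf]
    · by_cases hw : 'w' = c
      · subst hw; simp [pvRun, pvDfa, PySem.Dict.get?_mk_cons, pv_run4, List.isPrefixOf]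
      · simp [pvRun, pvDfa, PySem.Dict.get?, beq_iff_eq, hh, hw, List.isPrefixOf]

-- ===== VERDICT (by name: the statement is the Claim_ definition above) =====
theorem is_question_py_spec : Claim_equal_is_question_py := by
  intro query _
  unfold Spec_is_question_py is_question_py is_question_py_alt
  by_cases hq : PySem.Str.isIn "?" query = true
  · rw [if_pos hq, if_pos hq]
  · simp only [Bool.not_eq_true] at hq
    simp only [hq, Bool.false_eq_true, if_false]
    simp only [List.any_cons, List.any_nil, Bool.or_false, PySem.Str.startswith_eq,
      String.toList_append, PySem.Str.toList_strip, PySem.Str.toList_lower, PySem.Chars.startswith]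
    rw [pv_run0]
    have w1 : ("how" : String).toList ++ (" " : String).toList = ['h','o','w',' '] := by simp
    have w2 : ("what" : String).toList ++ (" " : String).toList = ['w','h','a','t',' '] := by simp
    have w3 : ("where" : String).toList ++ (" " : String).toList = ['w','h','e','r','e',' '] := by simp
    have w4 : ("when" : String).toList ++ (" " : String).toList = ['w','h','e','n',' '] := by simp
    have w5 : ("why" : String).toList ++ (" " : String).toList = ['w','h','y',' '] := by simp
    have w6 : ("which" : String).toList ++ (" " : String).toList = ['w','h','i','c','h',' '] := by simp
    have w7 : ("who" : String).toList ++ (" " : String).toList = ['w','h','o',' '] := by simp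
    rw [w1, w2, w3, w4, w5, w6, w7]
    simp [Bool.or_assoc]
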